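-- pv_equiv track=rewrite | github.com/omcakici/Python-Projects | BlackJack/blackJack_mine.py | CHECK_IS_ACE_PLUS_TEN
-- ===== SOURCE A (Python) =====
-- def CHECK_IS_ACE_PLUS_TEN(values) -> bool:
--   check_ACE = False
--   check_plus_ten = False
--   for c in values:
--     if c == 11:
--       check_ACE = True
--     elif c == 10:
--       check_plus_ten = True
--   return check_ACE and check_plus_ten
-- ===== SOURCE B (Python) =====
-- def CHECK_IS_ACE_PLUS_TEN(values) -> bool:
--   # Early-exit staged search: scan only until the FIRST 11 or 10; then the
--   # answer is whether the OTHER value occurs in the remaining suffix.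
--   for i, v in enumerate(values):
--     if v == 11:
--       return 10 in values[i+1:]
--     if v == 10:
--       return 11 in values[i+1:]
--   return False
-- ===== Notes on version B (the rewrite author's own statement) =====
-- stated objective: alternative
-- what changed: Replaced A's full-list fused loop maintaining two boolean flags by an early-exit staged search: scan only until the first 11 or 10 is found, then test only the remaining suffix for the other value, returning immediately.
import Mathlib
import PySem

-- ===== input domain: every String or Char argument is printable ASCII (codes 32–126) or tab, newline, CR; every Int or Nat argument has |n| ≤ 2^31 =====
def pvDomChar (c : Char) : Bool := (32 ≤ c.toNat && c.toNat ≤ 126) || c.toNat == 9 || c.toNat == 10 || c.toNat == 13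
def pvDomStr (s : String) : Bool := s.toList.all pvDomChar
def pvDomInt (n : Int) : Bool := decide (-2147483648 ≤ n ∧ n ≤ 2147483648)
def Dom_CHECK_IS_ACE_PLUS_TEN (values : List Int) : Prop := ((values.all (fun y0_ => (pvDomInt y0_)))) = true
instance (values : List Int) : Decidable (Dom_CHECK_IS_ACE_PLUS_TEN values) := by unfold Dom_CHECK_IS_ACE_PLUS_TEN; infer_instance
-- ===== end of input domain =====

-- ===== PORT A =====
-- header: B replaces A's full-list fused flag loop by an early-exit staged search (scan to the first 11/10, then test the suffix for the other); objective: alternative.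
def CHECK_IS_ACE_PLUS_TEN (values : List Int) : Bool :=
  let st := values.foldl (fun (st : Bool × Bool) c =>
    if c == 11 then (true, st.2)
    else if c == 10 then (st.1, true)
    else st) (false, false)
  st.1 && st.2

-- ===== PORT B =====
def CHECK_IS_ACE_PLUS_TEN_alt : List Int → Bool
  | [] => false
  | v :: rest =>
    if v == 11 then rest.contains 10
    else if v == 10 then rest.contains 11
    else CHECK_IS_ACE_PLUS_TEN_alt rest

-- ===== PRECONDITION & SPEC =====
def Spec_CHECK_IS_ACE_PLUS_TEN (values : List Int) (out : Bool) : Prop := out = CHECK_IS_ACE_PLUS_TEN_alt values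
instance (values : List Int) (out : Bool) : Decidable (Spec_CHECK_IS_ACE_PLUS_TEN values out) := by unfold Spec_CHECK_IS_ACE_PLUS_TEN; infer_instance

-- ===== CLAIM (what is proved, stated in full; the proofs are below) =====
def Claim_equal_CHECK_IS_ACE_PLUS_TEN : Prop := ∀ (values : List Int), Dom_CHECK_IS_ACE_PLUS_TEN values → Spec_CHECK_IS_ACE_PLUS_TEN values (CHECK_IS_ACE_PLUS_TEN values)

-- ===== LEMMAS AND PROOFS =====
lemma flags_foldl (values : List Int) (a b : Bool) :
    values.foldl (fun (st : Bool × Bool) c =>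
      if c == 11 then (true, st.2)
      else if c == 10 then (st.1, true)
      else st) (a, b)
    = (a || values.contains 11, b || values.contains 10) := by
  induction values generalizing a b with
  | nil => simp
  | cons x xs ih =>
    rw [List.foldl_cons]
    by_cases h11 : x == 11
    · have hx : x = 11 := by simpa using h11
      subst hx
      rw [if_pos h11, ih]
      simp
    · by_cases h10 : x == 10
      · have hx : x = 10 := by simpa using h10
        subst hx
        rw [if_neg h11, if_pos h10, ih]
        simp
      · rw [if_neg h11, if_neg h10, ih]
        have hx11 : (11 : Int) ≠ x := fun h => h11 (by simp [h.symm])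
        have hx10 : (10 : Int) ≠ x := fun h => h10 (by simp [h.symm])
        simp [hx11, hx10]

lemma alt_eq_contains (values : List Int) :
    CHECK_IS_ACE_PLUS_TEN_alt values = (values.contains 11 && values.contains 10) := by
  induction values with
  | nil => simp [CHECK_IS_ACE_PLUS_TEN_alt]
  | cons x xs ih =>
    by_cases h11 : x == 11
    · have hx : x = 11 := by simpa using h11
      subst hx
      simp [CHECK_IS_ACE_PLUS_TEN_alt]
    · by_cases h10 : x == 10
      · have hx : x = 10 := by simpa using h10
        subst hx
        simp [CHECK_IS_ACE_PLUS_TEN_alt]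
      · have hx11 : (11 : Int) ≠ x := fun h => h11 (by simp [h.symm])
        have hx10 : (10 : Int) ≠ x := fun h => h10 (by simp [h.symm])
        simp [CHECK_IS_ACE_PLUS_TEN_alt, h11, h10, ih, hx11, hx10]

-- ===== VERDICT (by name: the statement is the Claim_ definition above) =====
theorem CHECK_IS_ACE_PLUS_TEN_spec : Claim_equal_CHECK_IS_ACE_PLUS_TEN := by
  intro values _
  unfold Spec_CHECK_IS_ACE_PLUS_TEN CHECK_IS_ACE_PLUS_TEN
  rw [flags_foldl, alt_eq_contains]
  simp
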